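-- pv_equiv track=rewrite | github.com/ws-admin-maker/notion-automated-workflow | docs-to-notion/src/block_builder.py | _split_rich_text
-- ===== SOURCE A (Python) =====
-- def _split_rich_text(rich_text: list, max_len: int) -> list:
--     """
--     rich_textリストの合計文字数が max_len を超える場合、
--     複数のチャンクに分割する（1ブロック = 1チャンク）。
--     """
--     total = sum(len(rt.get("text", {}).get("content", "")) for rt in rich_text)
--     if total <= max_len:
--         return [rich_text]
--
--     chunks, current, current_len = [], [], 0
--     for rt in rich_text:
--         content = rt.get("text", {}).get("content", "")
--         while len(content) > 0:
--             space = max_len - current_len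
--             if space <= 0:
--                 chunks.append(current)
--                 current, current_len = [], 0
--                 space = max_len
--             piece = content[:space]
--             new_rt = {**rt, "text": {**rt.get("text", {}), "content": piece}}
--             current.append(new_rt)
--             current_len += len(piece)
--             content = content[space:]
--
--     if current:
--         chunks.append(current)
--     return chunks
-- ===== SOURCE B (Python) =====
-- def _split_rich_text(rich_text: list, max_len: int) -> list:
--     """
--     Same result as A: one chunk list per max_len characters, but computed with a
--     global running offset and modular arithmetic instead of a current/current_len
--     accumulator pair.
--     """
--     total = sum(len(rt.get("text", {}).get("content", "")) for rt in rich_text)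
--     if total <= max_len:
--         return [rich_text]
--
--     buckets = []
--     off = 0
--     for rt in rich_text:
--         content = rt.get("text", {}).get("content", "")
--         pos = 0
--         n = len(content)
--         while pos < n:
--             if off % max_len == 0:
--                 buckets.append([])
--             room = max_len - off % max_len
--             piece = content[pos:pos + room]
--             buckets[-1].append({**rt, "text": {**rt.get("text", {}), "content": piece}})
--             off += len(piece)
--             pos += len(piece)
--     return buckets
-- ===== Notes on version B (the rewrite author's own statement) =====
-- stated objective: alternative
-- what changed: Replaces A's stateful greedy loop (current chunk + current_len with lazy flushes and repeated re-slicing of a shrinking content string) by a single global character offset: chunk boundaries come from off % max_len / positional slicing, new buckets are opened eagerly and pieces are appended to the last bucket.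
import Mathlib
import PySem

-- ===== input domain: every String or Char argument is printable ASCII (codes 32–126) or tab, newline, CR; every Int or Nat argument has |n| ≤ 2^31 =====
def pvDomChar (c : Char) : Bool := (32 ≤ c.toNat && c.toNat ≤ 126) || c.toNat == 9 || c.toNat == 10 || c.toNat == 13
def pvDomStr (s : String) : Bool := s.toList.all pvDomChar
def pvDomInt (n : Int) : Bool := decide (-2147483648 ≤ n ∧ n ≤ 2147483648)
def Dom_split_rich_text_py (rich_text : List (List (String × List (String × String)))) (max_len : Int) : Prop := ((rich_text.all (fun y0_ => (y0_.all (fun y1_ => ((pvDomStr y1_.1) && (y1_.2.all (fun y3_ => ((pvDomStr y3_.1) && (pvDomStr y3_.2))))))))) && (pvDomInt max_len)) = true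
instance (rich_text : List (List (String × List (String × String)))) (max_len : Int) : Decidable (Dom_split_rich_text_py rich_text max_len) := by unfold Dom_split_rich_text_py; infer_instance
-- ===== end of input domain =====

-- B replaces A's stateful greedy loop (current chunk + running current_len, lazy flushes,
-- repeated re-slicing of a shrinking content string) by a single global character offset with
-- modular arithmetic: chunk boundaries are off % max_len, buckets are opened eagerly and pieces
-- appended to the last bucket (objective: alternative decomposition, same cost).

-- ===== PORT A =====
-- rt.get("text", {})  (a dict value is its association list)
def pvText (rt : List (String × List (String × String))) : List (String × String) :=
  PySem.Dict.getD (PySem.Dict.mk rt) "text" []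
-- rt.get("text", {}).get("content", "")
def pvContent (rt : List (String × List (String × String))) : String :=
  PySem.Dict.getD (PySem.Dict.mk (pvText rt)) "content" ""
-- {**rt, "text": {**rt.get("text", {}), "content": piece}}
def pvNewRT (rt : List (String × List (String × String))) (piece : String) : List (String × List (String × String)) :=
  (PySem.Dict.insert (PySem.Dict.mk rt) "text"
    (PySem.Dict.insert (PySem.Dict.mk (pvText rt)) "content" piece).items).items

-- A's inner 'while len(content) > 0' loop; state (chunks, current, current_len).
-- fuel only totalizes the recursion: it is content.length at entry, enough for every
-- input admitted by Pre_ (each iteration there consumes at least one character).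
def pvAwhile (max_len : Int) (rt : List (String × List (String × String))) :
    Nat → String → List (List (List (String × List (String × String)))) →
    List (List (String × List (String × String))) → Int →
    (List (List (List (String × List (String × String)))) × List (List (String × List (String × String))) × Int)
  | 0, _, chunks, current, current_len => (chunks, current, current_len)
  | fuel + 1, content, chunks, current, current_len =>
    if 0 < PySem.Str.len content then
      let space := max_len - current_len
      let st :=
        if space ≤ 0 then (chunks ++ [current], ([] : List (List (String × List (String × String)))), (0 : Int), max_len)
        else (chunks, current, current_len, space)
      let piece := PySem.Str.slice content none (some st.2.2.2)
      let new_rt := pvNewRT rt piece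
      pvAwhile max_len rt fuel (PySem.Str.slice content (some st.2.2.2) none)
        st.1 (st.2.1 ++ [new_rt]) (st.2.2.1 + PySem.Str.len piece)
    else (chunks, current, current_len)

def split_rich_text_py (rich_text : List (List (String × List (String × String)))) (max_len : Int) : List (List (List (String × List (String × String)))) :=
  let total := (rich_text.map (fun rt => PySem.Str.len (pvContent rt))).sum
  if total ≤ max_len then [rich_text]
  else
    let st := rich_text.foldl
      (fun s rt => pvAwhile max_len rt (pvContent rt).toList.length (pvContent rt) s.1 s.2.1 s.2.2)
      ([], [], 0)
    st.1 ++ (if st.2.1 ≠ [] then [st.2.1] else [])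

-- ===== PORT B =====
-- buckets[-1].append(x); the [] case is unreachable in B (a bucket is opened before the first
-- append) and only totalizes the helper.
def pvAppendLast (bs : List (List (List (String × List (String × String)))))
    (x : List (String × List (String × String))) : List (List (List (String × List (String × String)))) :=
  match bs with
  | [] => []
  | [c] => [c ++ [x]]
  | c :: rest => c :: pvAppendLast rest x

-- B's inner 'while pos < n' loop; state (buckets, off).  fuel = content.length at entry,
-- a totalizer exactly as in pvAwhile.
def pvBwhile (max_len : Int) (rt : List (String × List (String × String))) (content : String) :
    Nat → Int → List (List (List (String × List (String × String)))) → Int →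
    (List (List (List (String × List (String × String)))) × Int)
  | 0, _, buckets, off => (buckets, off)
  | fuel + 1, pos, buckets, off =>
    if pos < PySem.Str.len content then
      let buckets := if PySem.Int.mod off max_len = 0 then buckets ++ [[]] else buckets
      let room := max_len - PySem.Int.mod off max_len
      let piece := PySem.Str.slice content (some pos) (some (pos + room))
      let buckets := pvAppendLast buckets (pvNewRT rt piece)
      pvBwhile max_len rt content fuel (pos + PySem.Str.len piece) buckets (off + PySem.Str.len piece)
    else (buckets, off)

def split_rich_text_py_alt (rich_text : List (List (String × List (String × String)))) (max_len : Int) : List (List (List (String × List (String × String)))) :=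
  let total := (rich_text.map (fun rt => PySem.Str.len (pvContent rt))).sum
  if total ≤ max_len then [rich_text]
  else
    let st := rich_text.foldl
      (fun s rt => pvBwhile max_len rt (pvContent rt) (pvContent rt).toList.length 0 s.1 s.2)
      ([], 0)
    st.1

-- ===== PRECONDITION & SPEC =====
-- Pre_ is exactly where the Python A returns: with max_len ≤ 0 and some nonempty content past the
-- early return, A's while loop never terminates (piece becomes empty and content stops shrinking).
def Pre_split_rich_text_py (rich_text : List (List (String × List (String × String)))) (max_len : Int) : Prop :=
  1 ≤ max_len ∨ (rich_text.map (fun rt => PySem.Str.len (pvContent rt))).sum ≤ max_len ∨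
    ∀ rt ∈ rich_text, (pvContent rt).toList = []
instance (rich_text : List (List (String × List (String × String)))) (max_len : Int) : Decidable (Pre_split_rich_text_py rich_text max_len) := by unfold Pre_split_rich_text_py; infer_instance

def pvWitness_split_rich_text_py : (List (List (String × List (String × String)))) × Int :=
  ([[("text", [("content", "abc")])], [("text", [("content", "de")])]], 2)

def Spec_split_rich_text_py (rich_text : List (List (String × List (String × String)))) (max_len : Int) (out : List (List (List (String × List (String × String))))) : Prop := out = split_rich_text_py_alt rich_text max_len
instance (rich_text : List (List (String × List (String × String)))) (max_len : Int) (out : List (List (List (String × List (String × String))))) : Decidable (Spec_split_rich_text_py rich_text max_len out) := by unfold Spec_split_rich_text_py; infer_instance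

-- ===== CLAIM (what is proved, stated in full; the proofs are below) =====
def Claim_equal_split_rich_text_py : Prop := ∀ (rich_text : List (List (String × List (String × String)))) (max_len : Int), Dom_split_rich_text_py rich_text max_len → Pre_split_rich_text_py rich_text max_len → Spec_split_rich_text_py rich_text max_len (split_rich_text_py rich_text max_len)

-- ===== LEMMAS AND PROOFS =====

-- The simulation relation between A's state (chunks, current, current_len) and B's (buckets, off).
def pvRel (ml : Int)
    (a : List (List (List (String × List (String × String)))) × List (List (String × List (String × String))) × Int)
    (b : List (List (List (String × List (String × String)))) × Int) : Prop :=
  b.2 = ml * a.1.length + a.2.2 ∧ 0 ≤ a.2.2 ∧ a.2.2 ≤ ml ∧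
  (a.2.2 = 0 → a.2.1 = [] ∧ b.1 = a.1) ∧
  (0 < a.2.2 → a.2.1 ≠ [] ∧ b.1 = a.1 ++ [a.2.1])

theorem pvAppendLast_append (cs : List (List (List (String × List (String × String)))))
    (c : List (List (String × List (String × String))))
    (x : List (String × List (String × String))) :
    pvAppendLast (cs ++ [c]) x = cs ++ [c ++ [x]] := by
  induction cs with
  | nil => rfl
  | cons h t ih =>
    cases t with
    | nil => simp [pvAppendLast]
    | cons h' t' => simpa [pvAppendLast] using ih

-- piece facts: A slices the remaining content at the front, B slices the original at position p
theorem pvPiece (content contA : String) (p : Nat) (s : Int) (hs : 0 ≤ s)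
    (hcont : contA.toList = content.toList.drop p) :
    PySem.Str.slice contA none (some s) = PySem.Str.slice content (some (p:Int)) (some ((p:Int)+s))
    ∧ (PySem.Str.slice contA (some s) none).toList = content.toList.drop (p + min s.toNat (content.toList.length - p))
    ∧ PySem.Str.len (PySem.Str.slice contA none (some s)) = ((min s.toNat (content.toList.length - p) : Nat) : Int) := by
  obtain ⟨t, rfl⟩ : ∃ t : Nat, s = (t : Int) := ⟨s.toNat, by omega⟩
  have h1 : (PySem.Str.slice contA none (some (t:Int))).toList = (content.toList.drop p).take t := by
    rw [PySem.Str.toList_slice, PySem.Chars.slice_eq_listSlice, PySem.List.slice_to_natCast, hcont]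
  refine ⟨?_, ?_, ?_⟩
  · rw [← String.toList_inj, h1, PySem.Str.toList_slice, PySem.Chars.slice_eq_listSlice,
      PySem.List.slice_natCast_add]
  · rw [PySem.Str.toList_slice, PySem.Chars.slice_eq_listSlice, PySem.List.slice_from_natCast, hcont,
      List.drop_drop, Int.toNat_natCast]
    by_cases h : t ≤ content.toList.length - p
    · rw [Nat.min_eq_left h, Nat.add_comm]
    · rw [Nat.min_eq_right (by omega)]
      rw [List.drop_eq_nil_of_le (by omega), List.drop_eq_nil_of_le (by omega)]
  · rw [PySem.Str.len_eq, h1, Int.toNat_natCast]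
    simp [List.length_take]

theorem pvSim (ml : Int) (hml : 1 ≤ ml) (rt : List (String × List (String × String))) (content : String) :
    ∀ (fuel p : Nat) (contA : String)
      (chunks : List (List (List (String × List (String × String)))))
      (current : List (List (String × List (String × String)))) (clen : Int)
      (buckets : List (List (List (String × List (String × String))))) (off : Int),
      contA.toList = content.toList.drop p →
      pvRel ml (chunks, current, clen) (buckets, off) →
      pvRel ml (pvAwhile ml rt fuel contA chunks current clen)
               (pvBwhile ml rt content fuel (p : Int) buckets off) := by
  intro fuel
  induction fuel with
  | zero =>
    intro p contA chunks current clen buckets off hcont hrel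
    exact hrel
  | succ fuel ih =>
    intro p contA chunks current clen buckets off hcont hrel
    obtain ⟨hoff, h0, hle, hz, hpos⟩ := hrel
    simp only at hoff h0 hle hz hpos
    have hml' : (0:Int) < ml := by omega
    by_cases hp : p < content.toList.length
    · have hg1 : 0 < PySem.Str.len contA := by
        rw [PySem.Str.len_eq, hcont, List.length_drop]; omega
      have hg2 : (p:Int) < PySem.Str.len content := by
        rw [PySem.Str.len_eq]; omega
      simp only [pvAwhile, pvBwhile]
      rw [if_pos hg1, if_pos hg2]
      by_cases hc0 : clen = 0
      · -- chunk boundary with an empty current chunk (the initial state)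
        subst hc0
        obtain ⟨hcur, hbuck⟩ := hz rfl
        subst hcur; subst hbuck
        have hmod : PySem.Int.mod off ml = 0 := by
          rw [PySem.Int.mod_eq_emod_of_pos hml', hoff, add_zero, Int.mul_emod_right]
        rw [if_neg (show ¬ (ml - 0 ≤ 0) by omega), if_pos hmod, hmod]
        dsimp only
        obtain ⟨hpiece, hrest, hlen⟩ := pvPiece content contA p (ml - 0) (by omega) hcont
        have hlenB : PySem.Str.len (PySem.Str.slice content (some (p:Int)) (some ((p:Int) + (ml - 0)))) =
            ((min (ml - 0).toNat (content.toList.length - p) : Nat) : Int) := by rw [← hpiece]; exact hlen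
        rw [hpiece, hlenB,
          show ((p:Int) + ((min (ml - 0).toNat (content.toList.length - p) : Nat) : Int))
             = (((p + min (ml - 0).toNat (content.toList.length - p) : Nat)) : Int) by push_cast; ring]
        apply ih _ _ _ _ _ _ _ hrest
        refine ⟨?_, ?_, ?_, ?_, ?_⟩
        · simp only; rw [hoff]; push_cast; ring
        · simp only; push_cast; omega
        · simp only; push_cast; omega
        · intro h; simp only at h; exfalso; push_cast at h; omega
        · intro _
          exact ⟨by simp, by rw [pvAppendLast_append]⟩
      · by_cases hcm : clen = ml
        · -- current chunk exactly full: A flushes lazily, B opened the bucket eagerly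
          subst hcm
          obtain ⟨hne, hbuck⟩ := hpos (by omega)
          have hmod : PySem.Int.mod off clen = 0 := by
            rw [PySem.Int.mod_eq_emod_of_pos hml', hoff,
              show clen * (chunks.length : Int) + clen = clen * ((chunks.length : Int) + 1) by ring,
              Int.mul_emod_right]
          rw [if_pos (show clen - clen ≤ 0 by omega), if_pos hmod, hmod]
          dsimp only
          obtain ⟨hpiece, hrest, hlen⟩ := pvPiece content contA p clen (by omega) hcont
          have hlenB : PySem.Str.len (PySem.Str.slice content (some (p:Int)) (some ((p:Int) + (clen - 0)))) =
              ((min clen.toNat (content.toList.length - p) : Nat) : Int) := by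
            rw [show clen - (0:Int) = clen by ring, ← hpiece]; exact hlen
          rw [show clen - (0:Int) = clen by ring] at hlenB ⊢
          rw [hpiece, hlenB,
            show ((p:Int) + ((min clen.toNat (content.toList.length - p) : Nat) : Int))
               = (((p + min clen.toNat (content.toList.length - p) : Nat)) : Int) by push_cast; ring]
          apply ih _ _ _ _ _ _ _ hrest
          refine ⟨?_, ?_, ?_, ?_, ?_⟩
          · simp only [List.length_append, List.length_cons, List.length_nil]
            rw [hoff]; push_cast; ring
          · simp only; push_cast; omega
          · simp only; push_cast; omega
          · intro h; simp only at h; exfalso; push_cast at h; omega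
          · intro _
            refine ⟨by simp, ?_⟩
            rw [hbuck, pvAppendLast_append]
        · -- mid-chunk: 0 < clen < ml
          obtain ⟨hne, hbuck⟩ := hpos (by omega)
          have hmod : PySem.Int.mod off ml = clen := by
            rw [PySem.Int.mod_eq_emod_of_pos hml', hoff, add_comm, Int.add_mul_emod_self_left,
              Int.emod_eq_of_lt (by omega) (by omega)]
          rw [if_neg (show ¬ (ml - clen ≤ 0) by omega), if_neg (by rw [hmod]; omega), hmod]
          dsimp only
          obtain ⟨hpiece, hrest, hlen⟩ := pvPiece content contA p (ml - clen) (by omega) hcont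
          have hlenB : PySem.Str.len (PySem.Str.slice content (some (p:Int)) (some ((p:Int) + (ml - clen)))) =
              ((min (ml - clen).toNat (content.toList.length - p) : Nat) : Int) := by rw [← hpiece]; exact hlen
          rw [hpiece, hlenB,
            show ((p:Int) + ((min (ml - clen).toNat (content.toList.length - p) : Nat) : Int))
               = (((p + min (ml - clen).toNat (content.toList.length - p) : Nat)) : Int) by push_cast; ring]
          apply ih _ _ _ _ _ _ _ hrest
          refine ⟨?_, ?_, ?_, ?_, ?_⟩
          · simp only; rw [hoff]; push_cast; ring
          · simp only; push_cast; omega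
          · simp only; push_cast; omega
          · intro h; simp only at h; exfalso; push_cast at h; omega
          · intro _
            refine ⟨by simp, ?_⟩
            rw [hbuck, pvAppendLast_append]
    · have hd : contA.toList = [] := by
        rw [hcont]; exact List.drop_eq_nil_of_le (by omega)
      simp only [pvAwhile, pvBwhile]
      rw [if_neg (by rw [PySem.Str.len_eq, hd]; simp),
        if_neg (by rw [PySem.Str.len_eq]; omega)]
      exact ⟨hoff, h0, hle, hz, hpos⟩

theorem pvRel_result (ml : Int)
    (a : List (List (List (String × List (String × String)))) × List (List (String × List (String × String))) × Int)
    (b : List (List (List (String × List (String × String)))) × Int)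
    (h : pvRel ml a b) : a.1 ++ (if a.2.1 ≠ [] then [a.2.1] else []) = b.1 := by
  obtain ⟨-, h0, -, hz, hp⟩ := h
  rcases lt_or_eq_of_le h0 with hlt | heq
  · obtain ⟨hne, hb⟩ := hp hlt
    simp [hne, hb]
  · obtain ⟨hc, hb⟩ := hz heq.symm
    simp [hc, hb]

theorem pvFold (ml : Int) (hml : 1 ≤ ml) (l : List (List (String × List (String × String)))) :
    ∀ (a : List (List (List (String × List (String × String)))) × List (List (String × List (String × String))) × Int)
      (b : List (List (List (String × List (String × String)))) × Int),
      pvRel ml a b →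
      pvRel ml
        (l.foldl (fun s rt => pvAwhile ml rt (pvContent rt).toList.length (pvContent rt) s.1 s.2.1 s.2.2) a)
        (l.foldl (fun s rt => pvBwhile ml rt (pvContent rt) (pvContent rt).toList.length 0 s.1 s.2) b) := by
  induction l with
  | nil => intro a b h; exact h
  | cons rt t ih =>
    intro a b h
    simp only [List.foldl_cons]
    exact ih _ _ (by
      have := pvSim ml hml rt (pvContent rt) (pvContent rt).toList.length 0 (pvContent rt)
        a.1 a.2.1 a.2.2 b.1 b.2 (by simp) (by simpa using h)
      simpa using this)

-- ===== VERDICT (by name: the statement is the Claim_ definition above) =====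
theorem split_rich_text_py_spec : Claim_equal_split_rich_text_py := by
  intro rich_text max_len _ hpre
  unfold Spec_split_rich_text_py
  simp only [split_rich_text_py, split_rich_text_py_alt]
  by_cases htot : (rich_text.map (fun rt => PySem.Str.len (pvContent rt))).sum ≤ max_len
  · rw [if_pos htot, if_pos htot]
  · rw [if_neg htot, if_neg htot]
    rcases hpre with hml | h | hemp
    · have h0 : pvRel max_len ([], [], 0) ([], 0) :=
        ⟨by simp, le_refl 0, by simpa using (by omega : (0:Int) ≤ max_len),
          fun _ => ⟨rfl, rfl⟩, fun h => absurd h (by simp)⟩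
      exact pvRel_result max_len _ _ (pvFold max_len hml rich_text _ _ h0)
    · exact absurd h htot
    · -- every content is empty: both folds are no-ops (their fuel is 0), both results are []
      have hA : rich_text.foldl
          (fun s rt => pvAwhile max_len rt (pvContent rt).toList.length (pvContent rt) s.1 s.2.1 s.2.2)
          (([], [], 0) : List (List (List (String × List (String × String)))) × List (List (String × List (String × String))) × Int)
          = ([], [], 0) :=
        (PySem.List.foldl_congr_mem rich_text
          (fun s rt => pvAwhile max_len rt (pvContent rt).toList.length (pvContent rt) s.1 s.2.1 s.2.2)
          (fun acc _ => acc) ([], [], 0)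
          (fun acc rt hrt => by dsimp only; rw [hemp rt hrt]; rfl)).trans (PySem.List.foldl_ignore _ _)
      have hB : rich_text.foldl
          (fun s rt => pvBwhile max_len rt (pvContent rt) (pvContent rt).toList.length 0 s.1 s.2)
          (([], 0) : List (List (List (String × List (String × String)))) × Int)
          = ([], 0) :=
        (PySem.List.foldl_congr_mem rich_text
          (fun s rt => pvBwhile max_len rt (pvContent rt) (pvContent rt).toList.length 0 s.1 s.2)
          (fun acc _ => acc) ([], 0)
          (fun acc rt hrt => by dsimp only; rw [hemp rt hrt]; rfl)).trans (PySem.List.foldl_ignore _ _)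
      rw [hA, hB]
      simp
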